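-- pv_equiv track=rewrite | github.com/yasyasun/tasks | task1/task1.py | circular_array_path
-- ===== SOURCE A (Python) =====
-- def circular_array_path(size_array, length_interval):
--     """Функция выводит путь по круговому массиву."""
--     received_path = []
--     current_position = 1
--     while current_position not in received_path:
--         received_path.append(current_position)
--         current_position = (current_position + length_interval - 1) % size_array
--         if current_position == 0:
--             current_position = size_array
--     return received_path
-- ===== SOURCE B (Python) =====
-- def circular_array_path(size_array, length_interval):
--     """Функция выводит путь по круговому массиву."""
--     step = (length_interval - 1) % size_array
--     g, r = size_array, step
--     while r:
--         g, r = r, g % r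
--     count = size_array // g
--     return [(i * step) % size_array + 1 for i in range(count)]
-- ===== Notes on version B (the rewrite author's own statement) =====
-- stated objective: faster
-- what changed: Replaces the grow-and-membership-test simulation with number theory: the path length is size_array // gcd(size_array, step) with step=(length_interval-1)%size_array, so B computes the gcd by Euclid's algorithm and generates the path directly as [(i*step)%size_array+1 for i in range(count)].
-- outside the precondition, e.g. on circular_array_path(-3, 2): A returns [1, -1, -3, -2], B returns [1, -1, 0]; on circular_array_path(0, 3): A raises ZeroDivisionError, B raises ZeroDivisionError
import Mathlib
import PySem

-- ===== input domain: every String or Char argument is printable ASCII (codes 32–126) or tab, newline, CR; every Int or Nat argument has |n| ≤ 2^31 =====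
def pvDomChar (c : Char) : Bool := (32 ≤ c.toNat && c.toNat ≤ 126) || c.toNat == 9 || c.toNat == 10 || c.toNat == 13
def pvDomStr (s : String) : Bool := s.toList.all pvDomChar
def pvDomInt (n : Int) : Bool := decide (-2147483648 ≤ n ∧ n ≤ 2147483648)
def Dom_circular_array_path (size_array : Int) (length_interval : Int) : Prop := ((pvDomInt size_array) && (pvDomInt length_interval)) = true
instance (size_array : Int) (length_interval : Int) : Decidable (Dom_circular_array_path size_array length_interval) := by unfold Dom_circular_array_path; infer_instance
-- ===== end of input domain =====

-- B replaces A's grow-and-membership-test simulation by a closed-form path length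
-- (size // gcd(size, step)) plus direct generation of the path; objective: faster.


-- ===== PORT A =====
-- the body of A's while loop: pos = (pos + length_interval - 1) % size_array; if pos == 0: pos = size_array
def pvNextA (size_array length_interval pos : Int) : Int :=
  let c := PySem.Int.mod (pos + length_interval - 1) size_array
  if c = 0 then size_array else c

-- A's 'while current_position not in received_path' loop; the fuel only makes it total
-- (for size_array ≥ 1 the path has at most size_array elements, so it never runs out)
def pvLoopA (size_array length_interval : Int) : Nat → List Int → Int → List Int
  | 0, path, _ => path
  | fuel+1, path, pos =>
      if pos ∈ path then path
      else pvLoopA size_array length_interval fuel (path ++ [pos]) (pvNextA size_array length_interval pos)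

def circular_array_path (size_array : Int) (length_interval : Int) : List Int :=
  pvLoopA size_array length_interval (size_array.natAbs + 1) [] 1

-- ===== PORT B =====
-- Source B's hand-written Euclid loop 'while r: g, r = r, g % r', on naturals; exact for
-- size_array ≥ 1 (Pre_), where both g and r are nonnegative throughout
def pvEuclid : Nat → Nat → Nat
  | g, 0 => g
  | g, r+1 => pvEuclid (r+1) (g % (r+1))
  termination_by _ r => r
  decreasing_by exact Nat.mod_lt _ (Nat.succ_pos r)

def circular_array_path_alt (size_array : Int) (length_interval : Int) : List Int :=
  let step := PySem.Int.mod (length_interval - 1) size_array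
  let g : Int := (pvEuclid size_array.toNat step.toNat : Nat)
  let count := PySem.Int.floordiv size_array g
  (PySem.List.pyRange 0 count 1).map (fun i => PySem.Int.mod (i * step) size_array + 1)

-- ===== PRECONDITION & SPEC =====
-- Pre_ excludes size_array = 0 (both programs raise ZeroDivisionError) and negative
-- size_array, which is outside the natural domain of a circular-array size and on which
-- A's path is an artefact of Python's negative modulo (B returns a different list there).
def Pre_circular_array_path (size_array : Int) (length_interval : Int) : Prop :=
  1 ≤ size_array
instance (size_array : Int) (length_interval : Int) : Decidable (Pre_circular_array_path size_array length_interval) := by unfold Pre_circular_array_path; infer_instance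

def pvWitness_circular_array_path : Int × Int := (5, 3)

def Spec_circular_array_path (size_array : Int) (length_interval : Int) (out : List Int) : Prop := out = circular_array_path_alt size_array length_interval
instance (size_array : Int) (length_interval : Int) (out : List Int) : Decidable (Spec_circular_array_path size_array length_interval out) := by unfold Spec_circular_array_path; infer_instance

-- ===== CLAIM (what is proved, stated in full; the proofs are below) =====
def Claim_equal_circular_array_path : Prop := ∀ (size_array : Int) (length_interval : Int), Dom_circular_array_path size_array length_interval → Pre_circular_array_path size_array length_interval → Spec_circular_array_path size_array length_interval (circular_array_path size_array length_interval)

-- ===== LEMMAS AND PROOFS =====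

-- the i-th position of the path in Nat form: ((i*S) % N) + 1, with N = size, S = (L-1) % N
def pvP (N S i : Nat) : Int := ((i * S % N : Nat) : Int) + 1

theorem pvEuclid_eq_gcd (r g : Nat) : pvEuclid g r = Nat.gcd r g := by
  induction r using Nat.strong_induction_on generalizing g with
  | _ r ih =>
    match r with
    | 0 => simp [pvEuclid]
    | r+1 => rw [pvEuclid, ih (g % (r+1)) (Nat.mod_lt _ (Nat.succ_pos r)), ← Nat.gcd_rec]

-- N ∣ k*S iff M ∣ k, with M = N / gcd N S: the additive order of S in Z/N is M
theorem pv_dvd_mul_iff (N S k : Nat) (hN : 0 < N) : N ∣ k * S ↔ (N / Nat.gcd N S) ∣ k := by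
  have hg : 0 < Nat.gcd N S := Nat.gcd_pos_of_pos_left S hN
  have hN' : Nat.gcd N S * (N / Nat.gcd N S) = N := Nat.mul_div_cancel' (Nat.gcd_dvd_left N S)
  have hS' : Nat.gcd N S * (S / Nat.gcd N S) = S := Nat.mul_div_cancel' (Nat.gcd_dvd_right N S)
  have hcop : Nat.Coprime (N / Nat.gcd N S) (S / Nat.gcd N S) := Nat.coprime_div_gcd_div_gcd hg
  have key : k * S = Nat.gcd N S * (k * (S / Nat.gcd N S)) := by
    conv_lhs => rw [← hS']
    ring
  constructor
  · intro h
    have h2 : Nat.gcd N S * (N / Nat.gcd N S) ∣ Nat.gcd N S * (k * (S / Nat.gcd N S)) := by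
      rw [hN', ← key]; exact h
    exact hcop.dvd_of_dvd_mul_right ((Nat.mul_dvd_mul_iff_left hg).mp h2)
  · intro h
    rw [← hN', key]
    exact Nat.mul_dvd_mul_left _ (Dvd.dvd.mul_right h _)

-- one step of A's loop body advances pvP by one
theorem pv_next (n L : Int) (hn : 1 ≤ n) (i : Nat) :
    pvNextA n L (pvP n.toNat (PySem.Int.mod (L-1) n).toNat i)
      = pvP n.toNat (PySem.Int.mod (L-1) n).toNat (i+1) := by
  have hn0 : 0 < n := hn
  set N := n.toNat with hN
  have hnN : (N : Int) = n := Int.toNat_of_nonneg hn0.le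
  have hNpos : 0 < N := by omega
  set s := PySem.Int.mod (L-1) n with hs
  have hsemod : s = (L-1) % n := PySem.Int.mod_eq_emod_of_pos hn0
  have hs0 : 0 ≤ s := PySem.Int.mod_nonneg _ hn0
  have hsn : s < n := PySem.Int.mod_lt _ hn0
  set S := s.toNat with hS
  have hsS : (S : Int) = s := Int.toNat_of_nonneg hs0
  simp only [pvNextA, pvP]
  rw [PySem.Int.mod_eq_emod_of_pos hn0]
  have e1 : ((((i * S % N : Nat) : Int) + 1) + L - 1) % n = (((i+1) * S : Nat) + 1) % n := by
    have c1 : ((i * S % N : Nat) : Int) = ((i*S : Nat) : Int) % n := by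
      push_cast [← hnN]; rfl
    have c2 : (((i * S % N : Nat) : Int) + 1) + L - 1 = (((i*S : Nat) : Int) % n) + L := by
      rw [c1]; ring
    rw [c2, Int.emod_add_emod]
    have c3 : (L % n) = (s + 1) % n := by
      conv_lhs => rw [show L = (L - 1) + 1 by ring, Int.add_emod, ← hsemod]
      conv_rhs => rw [Int.add_emod]
      rw [Int.emod_eq_of_lt hs0 hsn]
    rw [Int.add_emod ((i*S : Nat) : Int) L, c3, ← Int.add_emod]
    congr 1
    push_cast
    rw [← hsS]
    ring
  rw [e1]
  set T := (i+1) * S % N with hT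
  have hTN : T < N := Nat.mod_lt _ hNpos
  have c1' : ((T : Int)) = (((i+1) * S : Nat) : Int) % n := by
    push_cast [← hnN]; rfl
  have c4 : (((i+1) * S : Nat) + 1 : Int) % n = ((T : Int) + 1) % n := by
    rw [c1', Int.emod_add_emod]
  rw [c4]
  clear_value T
  by_cases hcase : T + 1 = N
  · have : ((T:Int)+1) % n = 0 := by
      rw [show (T:Int) + 1 = n by omega]
      simp
    rw [this, if_pos rfl]
    omega
  · have : ((T:Int)+1) % n = (T:Int) + 1 := Int.emod_eq_of_lt (by omega) (by omega)
    rw [this]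
    rw [if_neg (by omega)]

-- pvP is injective below M = N / gcd N S
theorem pv_inj (N S : Nat) (hN : 0 < N) {i j : Nat} (hij : i < j) (hj : j < N / Nat.gcd N S) :
    pvP N S i ≠ pvP N S j := by
  intro h
  have h1 : i * S % N = j * S % N := by
    unfold pvP at h
    omega
  have h2 : N ∣ j * S - i * S := (Nat.modEq_iff_dvd' (Nat.mul_le_mul_right S hij.le)).mp h1
  have h3 : j * S - i * S = (j - i) * S := by
    rw [Nat.sub_mul]
  have h4 : (N / Nat.gcd N S) ∣ (j - i) := (pv_dvd_mul_iff N S (j-i) hN).mp (h3 ▸ h2)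
  have h5 : N / Nat.gcd N S ≤ j - i := Nat.le_of_dvd (by omega) h4
  omega

-- after M steps the path returns to the start
theorem pv_P_M (N S : Nat) (hN : 0 < N) : pvP N S (N / Nat.gcd N S) = pvP N S 0 := by
  have h : N ∣ (N / Nat.gcd N S) * S := (pv_dvd_mul_iff N S _ hN).mpr dvd_rfl
  have h2 : (N / Nat.gcd N S) * S % N = 0 := Nat.dvd_iff_mod_eq_zero.mp h
  unfold pvP
  rw [h2]
  simp

-- A's loop, started at step j of the orbit with the first j positions already recorded,
-- produces exactly the first M positions
theorem pv_loop (n L : Int) (hn : 1 ≤ n) :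
    ∀ (fuel j : Nat), j ≤ n.toNat / Nat.gcd n.toNat (PySem.Int.mod (L-1) n).toNat →
      n.toNat / Nat.gcd n.toNat (PySem.Int.mod (L-1) n).toNat - j + 1 ≤ fuel →
      pvLoopA n L fuel ((List.range j).map (pvP n.toNat (PySem.Int.mod (L-1) n).toNat))
          (pvP n.toNat (PySem.Int.mod (L-1) n).toNat j)
        = (List.range (n.toNat / Nat.gcd n.toNat (PySem.Int.mod (L-1) n).toNat)).map
            (pvP n.toNat (PySem.Int.mod (L-1) n).toNat) := by
  have hN : 0 < n.toNat := by omega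
  set N := n.toNat
  set S := (PySem.Int.mod (L-1) n).toNat
  set M := N / Nat.gcd N S with hM
  have hM1 : 1 ≤ M := Nat.div_pos (Nat.gcd_le_left S hN) (Nat.gcd_pos_of_pos_left S hN)
  intro fuel
  induction fuel with
  | zero => intro j _ h2; omega
  | succ fuel ih =>
    intro j hj hfuel
    rcases Nat.lt_or_eq_of_le hj with hlt | heq
    · rw [pvLoopA, if_neg, pv_next n L hn j]
      · have e : List.map (pvP N S) (List.range j) ++ [pvP N S j]
            = List.map (pvP N S) (List.range (j+1)) := by
          rw [List.range_succ, List.map_append, List.map_singleton]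
        rw [e]
        exact ih (j+1) hlt (by omega)
      · intro hmem
        obtain ⟨i, hi, hPi⟩ := List.mem_map.mp hmem
        exact pv_inj N S hN (List.mem_range.mp hi) hlt hPi
    · subst heq
      rw [pvLoopA, if_pos]
      rw [pv_P_M N S hN]
      exact List.mem_map_of_mem (List.mem_range.mpr hM1)

-- both ports compute the first M = N / gcd N S positions of the orbit
theorem pv_main (n L : Int) (hpre : 1 ≤ n) :
    circular_array_path n L = circular_array_path_alt n L := by
  have hn0 : 0 < n := hpre
  have hN : 0 < n.toNat := by omega
  set N := n.toNat with hNdef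
  have hnN : (N : Int) = n := Int.toNat_of_nonneg hn0.le
  set s := PySem.Int.mod (L-1) n with hs
  have hs0 : 0 ≤ s := PySem.Int.mod_nonneg _ hn0
  set S := s.toNat with hS
  have hsS : (S : Int) = s := Int.toNat_of_nonneg hs0
  set M := N / Nat.gcd N S with hM
  have hG : 0 < Nat.gcd N S := Nat.gcd_pos_of_pos_left S hN
  have halt : circular_array_path_alt n L = (List.range M).map (pvP N S) := by
    simp only [circular_array_path_alt]
    rw [← hNdef, ← hS, pvEuclid_eq_gcd, Nat.gcd_comm]
    have hcount : PySem.Int.floordiv n ((Nat.gcd N S : Nat) : Int) = (M : Int) := by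
      rw [PySem.Int.floordiv_eq_ediv_of_pos (by exact_mod_cast hG), ← hnN, hM,
        Int.natCast_ediv]
    rw [hcount, PySem.List.pyRange_zero_natCast, List.map_map]
    apply List.map_congr_left
    intro i _
    simp only [Function.comp_apply]
    rw [PySem.Int.mod_eq_emod_of_pos hn0]
    unfold pvP
    have : (i : Int) * s = ((i * S : Nat) : Int) := by rw [← hsS]; push_cast; ring
    rw [this]
    congr 1
    push_cast [← hnN]
    rfl
  have hA : circular_array_path n L = (List.range M).map (pvP N S) := by
    unfold circular_array_path
    have h0 : pvP N S 0 = 1 := by unfold pvP; simp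
    have hnil : ((List.range 0).map (pvP N S)) = ([] : List Int) := by simp
    rw [← h0, ← hnil]
    exact pv_loop n L hpre (n.natAbs + 1) 0 (Nat.zero_le _)
      (by
        have := Nat.div_le_self n.toNat (Nat.gcd n.toNat (PySem.Int.mod (L-1) n).toNat)
        omega)
  rw [hA, halt]

-- ===== VERDICT (by name: the statement is the Claim_ definition above) =====
theorem circular_array_path_spec : Claim_equal_circular_array_path := by
  intro n L _ hpre
  exact pv_main n L hpre
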